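-- pv_equiv track=rewrite | github.com/mathcoder9/advent2023 | src/Day14/day14.py | do_cycle
-- ===== SOURCE A (Python) =====
-- from typing import List, Tuple
--
-- def do_cycle(grid: List[List[int]]) -> List[List[int]]:
--     temp = grid
--     for _ in range(4):
--         temp = list(map("".join, zip(*temp)))
--         temp = [
--             "#".join(
--                 ["".join(sorted(group, reverse=True)) for group in row.split("#")]
--             )
--             for row in temp
--         ]
--         temp = [r[::-1] for r in temp]
--     return temp
-- ===== SOURCE B (Python) =====
-- def do_cycle(grid):
--     temp = grid
--     for _ in range(4):
--         rows = ["".join(col) for col in zip(*temp)]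
--         new = []
--         for row in rows:
--             parts = []
--             for group in row.split("#"):
--                 counts = {}
--                 for ch in group:
--                     counts[ch] = counts.get(ch, 0) + 1
--                 parts.append("".join(ch * counts[ch] for ch in sorted(counts, reverse=True)))
--             new.append("#".join(parts)[::-1])
--         temp = new
--     return temp
-- ===== Notes on version B (the rewrite author's own statement) =====
-- stated objective: alternative
-- what changed: replaces the per-group comparison sort (sorted(group, reverse=True)) by a counting sort: one pass builds a character-count dict and the group is re-emitted as count-sized blocks over the (few) distinct characters in descending order
import Mathlib
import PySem

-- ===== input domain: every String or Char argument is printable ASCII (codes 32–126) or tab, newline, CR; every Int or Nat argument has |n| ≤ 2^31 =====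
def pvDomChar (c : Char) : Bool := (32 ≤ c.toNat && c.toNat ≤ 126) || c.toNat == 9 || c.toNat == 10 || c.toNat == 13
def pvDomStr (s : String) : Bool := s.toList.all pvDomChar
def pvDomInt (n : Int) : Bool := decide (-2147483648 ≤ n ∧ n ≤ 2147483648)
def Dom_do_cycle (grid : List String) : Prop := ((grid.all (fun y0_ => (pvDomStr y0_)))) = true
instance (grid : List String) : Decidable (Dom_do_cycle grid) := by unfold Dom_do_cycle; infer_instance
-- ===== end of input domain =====

-- B replaces each per-group comparison sort by a counting sort (count dict + blocks over the
-- distinct characters in descending order); alternative algorithm, same return value everywhere.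

-- shared helper: `zip(*temp)` followed by `"".join` per tuple — both Pythons compute exactly
-- this (columns up to the shortest row; the `getD` default is never read inside the range)
def pyZipJoin (temp : List String) : List String :=
  (List.range ((temp.map (fun s => s.toList.length)).min?.getD 0)).map
    (fun i => String.ofList (temp.map (fun s => s.toList.getD i ' ')))

-- ===== PORT A =====
-- '#'.join(sorted(group, reverse=True) for group in row.split('#'))
def tiltRowA (row : String) : String :=
  String.ofList (PySem.Chars.join ['#']
    ((PySem.Chars.splitOn row.toList ['#']).map (fun g => PySem.List.sorted g (fun x => x) true)))

def stepA (temp : List String) : List String :=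
  let t1 := pyZipJoin temp
  let t2 := t1.map tiltRowA
  t2.map (fun r => String.ofList r.toList.reverse)  -- r[::-1] (full reverse slice, exact)

def do_cycle (grid : List String) : List String :=
  (List.range 4).foldl (fun temp _ => stepA temp) grid

-- ===== PORT B =====
-- counts = {}; for ch in group: counts[ch] = counts.get(ch, 0) + 1
-- ''.join(ch * counts[ch] for ch in sorted(counts, reverse=True))
-- (counts[ch]: ch is a key of counts here, so the KeyError branch is unreachable and the
--  lookup is ported as getD)
def tiltGroupB (g : List Char) : List Char :=
  let counts := g.foldl (fun d x => d.insert x (d.getD x 0 + 1)) (PySem.Dict.empty (κ := Char) (ν := Int))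
  PySem.Chars.join []
    ((PySem.List.sorted counts.keys (fun x => x) true).map
      (fun ch => PySem.List.pyRepeat [ch] (counts.getD ch 0)))

def rowB (row : String) : String :=
  let parts := (PySem.Chars.splitOn row.toList ['#']).foldl (fun ps g => ps ++ [tiltGroupB g]) []
  String.ofList (PySem.Chars.join ['#'] parts).reverse  -- '#'.join(parts)[::-1]

def stepB (temp : List String) : List String :=
  let rows := pyZipJoin temp
  rows.foldl (fun acc row => acc ++ [rowB row]) []

def do_cycle_alt (grid : List String) : List String :=
  (List.range 4).foldl (fun temp _ => stepB temp) grid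

-- ===== PRECONDITION & SPEC =====
def Spec_do_cycle (grid : List String) (out : List String) : Prop := out = do_cycle_alt grid
instance (grid : List String) (out : List String) : Decidable (Spec_do_cycle grid out) := by unfold Spec_do_cycle; infer_instance

-- ===== CLAIM (what is proved, stated in full; the proofs are below) =====
def Claim_equal_do_cycle : Prop := ∀ (grid : List String), Dom_do_cycle grid → Spec_do_cycle grid (do_cycle grid)

-- ===== LEMMAS AND PROOFS =====

theorem join_nil_eq_flatten (L : List (List Char)) : PySem.Chars.join [] L = L.flatten := by
  show List.intercalate [] L = L.flatten
  induction L with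
  | nil => rfl
  | cons h t ih =>
    cases t with
    | nil => simp [List.intercalate]
    | cons h2 t2 =>
      have ih' : (List.intersperse ([] : List Char) (h2 :: t2)).flatten = h2 ++ t2.flatten := by
        simpa [List.intercalate] using ih
      simp [List.intercalate, List.intersperse, ih']

theorem count_flatten_blocks (g : List Char) (a : Char) :
    ∀ (l : List Char), l.Nodup →
      List.count a ((l.map (fun ch => List.replicate (g.count ch) ch)).flatten)
        = if a ∈ l then g.count a else 0 := by
  intro l
  induction l with
  | nil => simp
  | cons h t ih =>
    intro hnd
    rcases List.nodup_cons.mp hnd with ⟨hh, ht⟩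
    simp only [List.map_cons, List.flatten_cons, List.count_append, ih ht,
      List.count_replicate, List.mem_cons]
    by_cases hah : h = a
    · subst hah
      simp [if_neg (fun hc => hh hc)]
    · have hne : ¬ a = h := fun hc => hah hc.symm
      simp only [hne, false_or]
      simp [hah]

theorem blocks_eq_sorted_rev (g : List Char) :
    ((PySem.List.sorted (PySem.Set.ofList g) (fun x => x) true).map
        (fun ch => List.replicate (g.count ch) ch)).flatten
      = PySem.List.sorted g (fun x => x) true := by
  have hperm_dk : (PySem.List.sorted (PySem.Set.ofList g) (fun x : Char => x) true).Perm
      (PySem.Set.ofList g) := PySem.List.sorted_perm _ _ _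
  have hnd : (PySem.List.sorted (PySem.Set.ofList g) (fun x : Char => x) true).Nodup :=
    hperm_dk.nodup_iff.mpr (PySem.Set.nodup_ofList g)
  have hmem : ∀ a : Char,
      a ∈ PySem.List.sorted (PySem.Set.ofList g) (fun x : Char => x) true ↔ a ∈ g := by
    intro a
    rw [PySem.List.mem_sorted, PySem.Set.mem_ofList]
  -- permutation, by counting each character
  have hperm : (((PySem.List.sorted (PySem.Set.ofList g) (fun x : Char => x) true).map
      (fun ch => List.replicate (g.count ch) ch)).flatten).Perm g := by
    rw [List.perm_iff_count]
    intro a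
    rw [count_flatten_blocks g a _ hnd]
    by_cases ha : a ∈ g
    · simp [(hmem a).mpr ha]
    · simp [ha, List.count_eq_zero_of_not_mem ha]
  -- both sides are sorted in descending order
  have hpw_dk : (PySem.List.sorted (PySem.Set.ofList g) (fun x : Char => x) true).Pairwise
      (fun a b => b ≤ a) := PySem.List.sorted_pairwise_rev _ _
  have hpw₁ : (((PySem.List.sorted (PySem.Set.ofList g) (fun x : Char => x) true).map
      (fun ch => List.replicate (g.count ch) ch)).flatten).Pairwise (fun a b : Char => b ≤ a) := by
    rw [List.pairwise_flatten]
    constructor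
    · intro s hs
      rcases List.mem_map.mp hs with ⟨ch, _, rfl⟩
      exact List.pairwise_replicate.mpr (Or.inr le_rfl)
    · rw [List.pairwise_map]
      refine hpw_dk.imp_of_mem ?_
      intro b c _ _ hle x hx y hy
      rw [List.eq_of_mem_replicate hx, List.eq_of_mem_replicate hy]
      exact hle
  have hpw₂ : (PySem.List.sorted g (fun x : Char => x) true).Pairwise (fun a b : Char => b ≤ a) :=
    PySem.List.sorted_pairwise_rev _ _
  exact List.Perm.eq_of_pairwise
    (fun a b _ _ h1 h2 => le_antisymm h2 h1) hpw₁ hpw₂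
    (hperm.trans (PySem.List.sorted_perm g _ _).symm)

-- the counting sort of B equals the reverse comparison sort of A, on every group
theorem tiltGroupB_eq_sorted (g : List Char) :
    tiltGroupB g = PySem.List.sorted g (fun x => x) true := by
  unfold tiltGroupB
  simp only [PySem.Dict.foldl_insert_getD_add_one_eq_counter, PySem.Dict.keys_counter,
    PySem.Dict.getD_counter, PySem.List.pyRepeat_singleton, Int.toNat_natCast,
    join_nil_eq_flatten]
  exact blocks_eq_sorted_rev g

theorem rowB_eq (row : String) :
    rowB row = String.ofList (tiltRowA row).toList.reverse := by
  unfold rowB tiltRowA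
  rw [PySem.List.foldl_append_singleton_eq_map]
  simp only [List.nil_append, String.toList_ofList]
  congr 2
  exact congrArg _ (List.map_congr_left (fun g _ => tiltGroupB_eq_sorted g))

theorem stepB_eq_stepA (temp : List String) : stepB temp = stepA temp := by
  unfold stepB stepA
  rw [PySem.List.foldl_append_singleton_eq_map]
  simp only [List.nil_append, List.map_map]
  exact List.map_congr_left (fun row _ => rowB_eq row)

-- ===== VERDICT (by name: the statement is the Claim_ definition above) =====
theorem do_cycle_spec : Claim_equal_do_cycle := by
  intro grid _
  show do_cycle grid = do_cycle_alt grid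
  unfold do_cycle do_cycle_alt
  simp only [List.range_succ, List.foldl_append, List.foldl_cons, List.foldl_nil,
    stepB_eq_stepA]
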